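-- pv_equiv track=rewrite | github.com/Radzio310/zprp-backend | app/zprp/officials.py | _merge_officials
-- ===== SOURCE A (Python) =====
-- from typing import Any, Dict, List, Tuple
-- from typing import Optional, Union, Any, Dict, List, Tuple
--
-- def _merge_officials(dst: Dict[str, Dict[str, Any]], src: Dict[str, Dict[str, Any]]) -> Tuple[int, int]:
--     added = 0
--     overwritten = 0
--     for k, v in (src or {}).items():
--         if k in dst:
--             overwritten += 1
--         else:
--             added += 1
--         dst[k] = v
--     return added, overwritten
-- ===== SOURCE B (Python) =====
-- def _merge_officials(dst, src):
--     s = src or {}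
--     src_keys = set(s)
--     # scan the *destination* once: every dst key that also occurs in src will be overwritten
--     overwritten = sum(1 for k in dst if k in src_keys)
--     added = len(s) - overwritten
--     dst.update(s)
--     return added, overwritten
-- ===== Notes on version B (the rewrite author's own statement) =====
-- stated objective: alternative
-- what changed: Instead of iterating over src and branching per item, B scans the destination dict once, counting dst keys that occur in a prebuilt src key set (these are exactly the overwritten ones), derives added = len(src) - overwritten, and mutates dst with one bulk update; Pre_ excludes association lists with duplicate keys, which represent no Python dict.
import Mathlib
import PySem

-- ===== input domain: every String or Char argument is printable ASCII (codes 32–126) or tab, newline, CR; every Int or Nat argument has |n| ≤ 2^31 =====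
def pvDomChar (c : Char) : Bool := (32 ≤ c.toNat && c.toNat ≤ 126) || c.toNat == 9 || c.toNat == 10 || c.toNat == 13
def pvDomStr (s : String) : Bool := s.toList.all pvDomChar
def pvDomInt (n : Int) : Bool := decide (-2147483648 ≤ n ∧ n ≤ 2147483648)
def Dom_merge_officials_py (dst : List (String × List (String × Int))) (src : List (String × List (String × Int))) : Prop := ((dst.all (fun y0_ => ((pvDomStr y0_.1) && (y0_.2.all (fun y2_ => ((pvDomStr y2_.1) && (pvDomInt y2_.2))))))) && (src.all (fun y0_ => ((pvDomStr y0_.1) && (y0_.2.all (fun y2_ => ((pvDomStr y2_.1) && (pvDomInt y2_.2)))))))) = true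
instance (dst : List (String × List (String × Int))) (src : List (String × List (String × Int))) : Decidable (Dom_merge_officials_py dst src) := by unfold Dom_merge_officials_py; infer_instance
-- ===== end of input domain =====

-- One honest line: B scans the DESTINATION once, counting dst keys found in a prebuilt src
-- key set (= overwritten), and derives added = len(src) - overwritten; both mutate dst
-- identically in Python, and the equivalence proved here is about the return value.

-- ===== PORT A =====
-- Python 'dst[k] = v' on an insertion-ordered assoc list: overwrite first match in place, else append
def pvSetItem (d : List (String × List (String × Int))) (k : String) (v : List (String × Int)) : List (String × List (String × Int)) :=
  match d with
  | [] => [(k, v)]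
  | (k', v') :: t => if k' == k then (k, v) :: t else (k', v') :: pvSetItem t k v

-- one iteration of A's loop body on the state (added, overwritten, dst)
def pvStepA (st : Int × Int × List (String × List (String × Int))) (kv : String × List (String × Int)) : Int × Int × List (String × List (String × Int)) :=
  if st.2.2.any (fun p => p.1 == kv.1) then (st.1, st.2.1 + 1, pvSetItem st.2.2 kv.1 kv.2)
  else (st.1 + 1, st.2.1, pvSetItem st.2.2 kv.1 kv.2)

def merge_officials_py (dst : List (String × List (String × Int))) (src : List (String × List (String × Int))) : Int × Int :=
  -- added = 0; overwritten = 0; for k, v in (src or {}).items(): …; dst[k] = v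
  let r := src.foldl pvStepA ((0 : Int), (0 : Int), dst)
  (r.1, r.2.1)

-- ===== PORT B =====
def merge_officials_py_alt (dst : List (String × List (String × Int))) (src : List (String × List (String × Int))) : Int × Int :=
  -- src_keys = set(s); overwritten = sum(1 for k in dst if k in src_keys); added = len(s) - overwritten
  let srcKeys : PySem.Set String := PySem.Set.ofList (src.map Prod.fst)
  let overwritten : Int :=
    dst.foldl (fun acc p => if PySem.Set.contains srcKeys p.1 then acc + 1 else acc) 0
  ((src.length : Int) - overwritten, overwritten)

-- ===== PRECONDITION & SPEC =====
-- Pre_ requires both argument lists to have distinct keys: both parameters are Python dicts,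
-- which cannot hold duplicate keys, so duplicate-key association lists represent no Python input.
def Pre_merge_officials_py (dst : List (String × List (String × Int))) (src : List (String × List (String × Int))) : Prop :=
  (dst.map Prod.fst).Nodup ∧ (src.map Prod.fst).Nodup
instance (dst : List (String × List (String × Int))) (src : List (String × List (String × Int))) : Decidable (Pre_merge_officials_py dst src) := by unfold Pre_merge_officials_py; infer_instance

def pvWitness_merge_officials_py : (List (String × List (String × Int))) × (List (String × List (String × Int))) :=
  ([("a", [("x", 1)])], [("a", [("y", 2)]), ("b", [])])

def Spec_merge_officials_py (dst : List (String × List (String × Int))) (src : List (String × List (String × Int))) (out : Int × Int) : Prop := out = merge_officials_py_alt dst src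
instance (dst : List (String × List (String × Int))) (src : List (String × List (String × Int))) (out : Int × Int) : Decidable (Spec_merge_officials_py dst src out) := by unfold Spec_merge_officials_py; infer_instance

-- ===== CLAIM =====
def Claim_equal_merge_officials_py : Prop := ∀ (dst : List (String × List (String × Int))) (src : List (String × List (String × Int))), Dom_merge_officials_py dst src → Pre_merge_officials_py dst src → Spec_merge_officials_py dst src (merge_officials_py dst src)

-- ===== LEMMAS AND PROOFS =====

-- pvSetItem only adds the key k to the key set of d
lemma any_pvSetItem (d : List (String × List (String × Int))) (k x : String) (v : List (String × Int)) :
    (pvSetItem d k v).any (fun p => p.1 == x) = ((d.any (fun p => p.1 == x)) || (k == x)) := by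
  induction d with
  | nil => simp [pvSetItem]
  | cons hd t ih =>
    obtain ⟨k', v'⟩ := hd
    simp only [pvSetItem]
    by_cases h : (k' == k) = true
    · have hk : k' = k := by simpa using h
      subst hk
      simp only [if_pos h, List.any_cons]
      cases (k' == x) <;> simp
    · simp only [if_neg h, List.any_cons, ih]
      cases (k' == x) <;> simp

-- A's loop, unrolled: with distinct src keys the evolving dict can be replaced by the initial one
lemma loopA_eq (src : List (String × List (String × Int))) :
    ∀ (d : List (String × List (String × Int))) (ad ow : Int),
    (src.map Prod.fst).Nodup →
    (src.foldl pvStepA (ad, ow, d)).1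
      = ad + ((src.filter (fun kv => !(d.any (fun p => p.1 == kv.1)))).length : Int)
    ∧
    (src.foldl pvStepA (ad, ow, d)).2.1
      = ow + ((src.filter (fun kv => d.any (fun p => p.1 == kv.1))).length : Int) := by
  induction src with
  | nil => intro d ad ow _; simp
  | cons kv t ih =>
    intro d ad ow hnd
    have hnd' : (t.map Prod.fst).Nodup := (List.nodup_cons.mp (by simpa using hnd)).2
    have hnotin : kv.1 ∉ t.map Prod.fst := (List.nodup_cons.mp (by simpa using hnd)).1
    have hkey : ∀ x ∈ t, ((pvSetItem d kv.1 kv.2).any (fun q => q.1 == x.1)) = (d.any (fun q => q.1 == x.1)) := by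
      intro x hx
      have hne : (kv.1 == x.1) = false := by
        by_contra hc
        have : kv.1 = x.1 := by
          have := Bool.not_eq_false _ |>.mp hc
          simpa using this
        exact hnotin (this ▸ List.mem_map_of_mem hx)
      rw [any_pvSetItem, hne, Bool.or_false]
    have hc1 : t.filter (fun x => !((pvSetItem d kv.1 kv.2).any (fun q => q.1 == x.1)))
        = t.filter (fun x => !(d.any (fun q => q.1 == x.1))) :=
      List.filter_congr (fun x hx => by rw [hkey x hx])
    have hc2 : t.filter (fun x => (pvSetItem d kv.1 kv.2).any (fun q => q.1 == x.1))
        = t.filter (fun x => d.any (fun q => q.1 == x.1)) :=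
      List.filter_congr (fun x hx => by rw [hkey x hx])
    by_cases h : (d.any (fun p => p.1 == kv.1)) = true
    · simp only [List.foldl_cons, pvStepA, h, if_pos]
      obtain ⟨h1, h2⟩ := ih (pvSetItem d kv.1 kv.2) ad (ow + 1) hnd'
      rw [h1, h2, hc1, hc2]
      simp only [List.filter_cons, h, Bool.not_true]
      constructor
      · simp
      · simp only [if_pos, List.length_cons]
        push_cast
        ring
    · have hb : (d.any (fun p => p.1 == kv.1)) = false := Bool.eq_false_iff.mpr h
      simp only [List.foldl_cons, pvStepA, hb, Bool.false_eq_true, if_false]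
      obtain ⟨h1, h2⟩ := ih (pvSetItem d kv.1 kv.2) (ad + 1) ow hnd'
      rw [h1, h2, hc1, hc2]
      simp only [List.filter_cons, hb, Bool.not_false]
      constructor
      · simp only [if_pos, List.length_cons]
        push_cast
        ring
      · simp

-- B's counting fold is the length of a filter
lemma foldl_count_eq {α : Type} (q : α → Bool) (l : List α) :
    ∀ (c : Int), l.foldl (fun acc p => if q p then acc + 1 else acc) c
      = c + ((l.filter q).length : Int) := by
  induction l with
  | nil => intro c; simp
  | cons x t ih =>
    intro c
    rw [List.foldl_cons, List.filter_cons]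
    by_cases h : q x = true
    · rw [if_pos h, if_pos h, ih]
      simp only [List.length_cons]
      push_cast
      ring
    · rw [if_neg h, if_neg h, ih]

-- counting the intersection from either side gives the same cardinality (both lists Nodup)
lemma filter_mem_length_comm {α : Type} [DecidableEq α] (a b : List α)
    (ha : a.Nodup) (hb : b.Nodup) :
    (a.filter (fun x => decide (x ∈ b))).length = (b.filter (fun x => decide (x ∈ a))).length := by
  have h1 : (a.filter (fun x => decide (x ∈ b))).Nodup := ha.filter _
  have h2 : (b.filter (fun x => decide (x ∈ a))).Nodup := hb.filter _
  rw [← List.toFinset_card_of_nodup h1, ← List.toFinset_card_of_nodup h2]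
  have e1 : (a.filter (fun x => decide (x ∈ b))).toFinset = a.toFinset ∩ b.toFinset := by
    ext x; simp
  have e2 : (b.filter (fun x => decide (x ∈ a))).toFinset = b.toFinset ∩ a.toFinset := by
    ext x; simp
  rw [e1, e2, Finset.inter_comm]

-- ===== VERDICT =====
theorem merge_officials_py_spec : Claim_equal_merge_officials_py := by
  intro dst src _ hpre
  obtain ⟨hd, hs⟩ := hpre
  unfold Spec_merge_officials_py
  obtain ⟨h1, h2⟩ := loopA_eq src dst 0 0 hs
  simp only [merge_officials_py, merge_officials_py_alt]
  rw [h1, h2]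
  -- B's fold counts |dst-keys ∩ src-keys|
  rw [foldl_count_eq]
  -- rewrite both counts as filters over key lists
  have hpredB : dst.filter (fun p => PySem.Set.contains (PySem.Set.ofList (src.map Prod.fst)) p.1)
      = dst.filter (fun p => decide (p.1 ∈ src.map Prod.fst)) := by
    refine List.filter_congr (fun p _ => ?_)
    rw [Bool.eq_iff_iff]
    simp [PySem.Set.mem_ofList]
  have hpredA : src.filter (fun kv => dst.any (fun p => p.1 == kv.1))
      = src.filter (fun kv => decide (kv.1 ∈ dst.map Prod.fst)) := by
    refine List.filter_congr (fun kv _ => ?_)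
    rw [Bool.eq_iff_iff]
    simp
  have hmapB : (dst.filter (fun p => decide (p.1 ∈ src.map Prod.fst))).length
      = ((dst.map Prod.fst).filter (fun k => decide (k ∈ src.map Prod.fst))).length := by
    rw [List.filter_map]; simp only [List.length_map]; rfl
  have hmapA : (src.filter (fun kv => decide (kv.1 ∈ dst.map Prod.fst))).length
      = ((src.map Prod.fst).filter (fun k => decide (k ∈ dst.map Prod.fst))).length := by
    rw [List.filter_map]; simp only [List.length_map]; rfl
  have hcomm := filter_mem_length_comm (dst.map Prod.fst) (src.map Prod.fst) hd hs
  have hov : (src.filter (fun kv => dst.any (fun p => p.1 == kv.1))).length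
      = (dst.filter (fun p => PySem.Set.contains (PySem.Set.ofList (src.map Prod.fst)) p.1)).length := by
    rw [hpredA, hmapA, ← hcomm, ← hmapB, ← hpredB]
  have hsplit : src.length = (src.filter (fun kv => dst.any (fun p => p.1 == kv.1))).length
      + (src.filter (fun kv => !(dst.any (fun p => p.1 == kv.1)))).length :=
    List.length_eq_length_filter_add _
  simp only [Prod.mk.injEq]
  constructor
  · omega
  · omega
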